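-- pv_equiv track=rewrite | github.com/Ranjithkumar3005/Leetcode-problems | Medium/984.py | strWithout3a3b
-- ===== SOURCE A (Python) =====
-- def strWithout3a3b(a: int, b: int) -> str:
--     result = []
--     while a > 0 or b > 0:
--         if a > b:
--             if a > 1:
--                 result.append("aa")
--                 a -= 2
--             else:
--                 result.append("a")
--                 a -= 1
--             if b > 0:
--                 result.append("b")
--                 b -= 1
--         elif b > a:
--             if b > 1:
--                 result.append("bb")
--                 b -= 2
--             else:
--                 result.append("b")
--                 b -= 1
--             if a > 0:
--                 result.append("a")
--                 a -= 1
--         else: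
--             if a > 0:
--                 result.append("a")
--                 a -= 1
--             if b > 0:
--                 result.append("b")
--                 b -= 1
--
--     return "".join(result)
-- ===== SOURCE B (Python) =====
-- def strWithout3a3b(a: int, b: int) -> str:
--     # closed form: count the greedy blocks arithmetically instead of looping
--     if b <= 0:
--         return "a" * a          # "a" * negative == ""
--     if a <= 0:
--         return "b" * b
--     if a == b:
--         return "ab" * a
--     if a > b:
--         if a - b <= b:
--             return "aab" * (a - b) + "ab" * (2 * b - a)
--         return "aab" * b + "a" * (a - 2 * b)
--     if b - a <= a:
--         return "bba" * (b - a) + "ab" * (2 * a - b)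
--     return "bba" * a + "b" * (b - 2 * a)
-- ===== Notes on version B (the rewrite author's own statement) =====
-- stated objective: faster
-- what changed: Replaced A's greedy while-loop that appends a chunk per iteration with a closed arithmetic form that counts the 'aab'/'bba'/'ab' blocks directly and builds the result by string repetition.
import Mathlib
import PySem

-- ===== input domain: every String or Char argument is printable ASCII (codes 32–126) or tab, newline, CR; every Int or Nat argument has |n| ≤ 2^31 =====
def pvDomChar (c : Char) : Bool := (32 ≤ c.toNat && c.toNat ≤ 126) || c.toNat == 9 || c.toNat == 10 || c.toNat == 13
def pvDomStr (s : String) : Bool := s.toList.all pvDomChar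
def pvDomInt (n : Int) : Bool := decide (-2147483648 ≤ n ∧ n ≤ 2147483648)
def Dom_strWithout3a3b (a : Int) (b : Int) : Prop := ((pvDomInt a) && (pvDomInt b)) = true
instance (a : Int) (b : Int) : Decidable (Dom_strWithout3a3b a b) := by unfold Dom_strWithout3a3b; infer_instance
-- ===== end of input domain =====

-- B replaces A's greedy while-loop by a closed arithmetic form: it counts the "aab"/"bba"/"ab"
-- blocks directly and builds the answer by string repetition (objective: simpler/alternative).

-- ===== PORT A =====
-- the while-loop of A, appending the same chunks in the same order; chunks are List Char,
-- joined into a String at the end (exact: "".join of the appended pieces)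
def pvALoop (a b : Int) : List Char :=
  if _h : a > 0 ∨ b > 0 then
    if a > b then
      (if a > 1 then ['a','a'] else ['a']) ++ (if b > 0 then ['b'] else []) ++
        pvALoop (if a > 1 then a - 2 else a - 1) (if b > 0 then b - 1 else b)
    else if b > a then
      (if b > 1 then ['b','b'] else ['b']) ++ (if a > 0 then ['a'] else []) ++
        pvALoop (if a > 0 then a - 1 else a) (if b > 1 then b - 2 else b - 1)
    else
      (if a > 0 then ['a'] else []) ++ (if b > 0 then ['b'] else []) ++
        pvALoop (if a > 0 then a - 1 else a) (if b > 0 then b - 1 else b)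
  else []
termination_by a.toNat + b.toNat
decreasing_by all_goals (split_ifs <;> omega)

def strWithout3a3b (a : Int) (b : Int) : String := String.mk (pvALoop a b)

-- ===== PORT B =====
-- Python's  s * n  (empty for n ≤ 0)
def pvRep (s : List Char) (n : Int) : List Char := List.flatten (List.replicate n.toNat s)

def pvBCore (a b : Int) : List Char :=
  if b ≤ 0 then pvRep ['a'] a
  else if a ≤ 0 then pvRep ['b'] b
  else if a = b then pvRep ['a','b'] a
  else if a > b then
    if a - b ≤ b then pvRep ['a','a','b'] (a - b) ++ pvRep ['a','b'] (2*b - a)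
    else pvRep ['a','a','b'] b ++ pvRep ['a'] (a - 2*b)
  else
    if b - a ≤ a then pvRep ['b','b','a'] (b - a) ++ pvRep ['a','b'] (2*a - b)
    else pvRep ['b','b','a'] a ++ pvRep ['b'] (b - 2*a)

def strWithout3a3b_alt (a : Int) (b : Int) : String := String.mk (pvBCore a b)

-- ===== PRECONDITION & SPEC =====
def Spec_strWithout3a3b (a : Int) (b : Int) (out : String) : Prop := out = strWithout3a3b_alt a b
instance (a : Int) (b : Int) (out : String) : Decidable (Spec_strWithout3a3b a b out) := by unfold Spec_strWithout3a3b; infer_instance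

-- ===== CLAIM (what is proved, stated in full; the proofs are below) =====
def Claim_equal_strWithout3a3b : Prop := ∀ (a : Int) (b : Int), Dom_strWithout3a3b a b → Spec_strWithout3a3b a b (strWithout3a3b a b)

-- ===== LEMMAS AND PROOFS =====

theorem pvRep_nonpos {s : List Char} {n : Int} (h : n ≤ 0) : pvRep s n = [] := by
  simp [pvRep, Int.toNat_of_nonpos h]

theorem pvRep_succ {s : List Char} {n : Int} (h : 0 < n) : pvRep s n = s ++ pvRep s (n - 1) := by
  unfold pvRep
  rw [show n.toNat = (n - 1).toNat + 1 by omega, List.replicate_succ, List.flatten_cons]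

-- the three simple shapes of B's closed form
theorem pvBCore_as {a b : Int} (h : b ≤ 0) : pvBCore a b = pvRep ['a'] a := by
  rw [pvBCore, if_pos h]

theorem pvBCore_bs {a b : Int} (h1 : 0 < b) (h2 : a ≤ 0) : pvBCore a b = pvRep ['b'] b := by
  rw [pvBCore, if_neg (by omega : ¬ b ≤ 0), if_pos h2]

theorem pvBCore_eq {a b : Int} (h1 : 0 < b) (h2 : a = b) : pvBCore a b = pvRep ['a','b'] a := by
  rw [pvBCore, if_neg (by omega : ¬ b ≤ 0), if_neg (by omega : ¬ a ≤ 0), if_pos h2]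

-- B's closed form satisfies A's "aab" recurrence
theorem pvBCore_aab {a b : Int} (hb : 0 < b) (hab : b < a) :
    pvBCore a b = ['a','a','b'] ++ pvBCore (a - 2) (b - 1) := by
  by_cases h1 : b = 1
  · subst h1
    rw [show pvBCore (a - 2) (1 - 1) = pvRep ['a'] (a - 2) from pvBCore_as (by omega)]
    by_cases h2 : a = 2
    · subst h2
      decide
    · -- a ≥ 3, b = 1
      rw [pvBCore,
        if_neg (by omega : ¬ (1:Int) ≤ 0), if_neg (by omega : ¬ a ≤ 0),
        if_neg (by omega : ¬ a = 1), if_pos hab, if_neg (by omega : ¬ a - 1 ≤ 1)]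
      rw [pvRep_succ (by omega : (0:Int) < 1), pvRep_nonpos (by omega : (1:Int) - 1 ≤ 0),
        show (a - 2 * 1 : Int) = a - 2 by ring]
      simp
  · -- b ≥ 2
    rw [pvBCore,
      if_neg (by omega : ¬ b ≤ 0), if_neg (by omega : ¬ a ≤ 0),
      if_neg (by omega : ¬ a = b), if_pos hab]
    by_cases he : a - 2 = b - 1
    · rw [if_pos (by omega : a - b ≤ b),
        show pvBCore (a - 2) (b - 1) = pvRep ['a','b'] (a - 2) from
          pvBCore_eq (by omega) he]
      rw [pvRep_succ (by omega : (0:Int) < a - b), pvRep_nonpos (by omega : a - b - 1 ≤ 0),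
        show (2*b - a : Int) = a - 2 by omega]
      simp
    · rw [pvBCore,
        if_neg (by omega : ¬ b - 1 ≤ 0), if_neg (by omega : ¬ a - 2 ≤ 0),
        if_neg he, if_pos (by omega : a - 2 > b - 1)]
      by_cases hc : a - b ≤ b
      · rw [if_pos hc, if_pos (by omega : a - 2 - (b - 1) ≤ b - 1)]
        rw [pvRep_succ (by omega : (0:Int) < a - b),
          show (a - b - 1 : Int) = a - 2 - (b - 1) by omega,
          show (2*b - a : Int) = 2 * (b - 1) - (a - 2) by omega]
        simp
      · rw [if_neg hc, if_neg (by omega : ¬ a - 2 - (b - 1) ≤ b - 1)]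
        rw [pvRep_succ (by omega : (0:Int) < b),
          show (a - 2*b : Int) = a - 2 - 2 * (b - 1) by omega]
        simp

-- B's closed form satisfies A's "bba" recurrence
theorem pvBCore_bba {a b : Int} (ha : 0 < a) (hab : a < b) :
    pvBCore a b = ['b','b','a'] ++ pvBCore (a - 1) (b - 2) := by
  by_cases h1 : a = 1
  · subst h1
    by_cases h2 : b = 2
    · subst h2
      rw [show pvBCore (1 - 1) (2 - 2) = pvRep ['a'] (1 - 1) from pvBCore_as (by omega),
        pvRep_nonpos (by omega : (1:Int) - 1 ≤ 0)]
      rw [pvBCore, if_neg (by omega : ¬ (2:Int) ≤ 0), if_neg (by omega : ¬ (1:Int) ≤ 0),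
        if_neg (by omega : (1:Int) ≠ 2), if_neg (by omega : ¬ (1:Int) > 2),
        if_pos (by omega : (2:Int) - 1 ≤ 1)]
      rw [pvRep_succ (by omega : (0:Int) < 2 - 1), pvRep_nonpos (by omega : (2:Int) - 1 - 1 ≤ 0),
        pvRep_nonpos (by omega : 2*1 - 2 ≤ (0:Int))]
      simp
    · -- b ≥ 3, a = 1
      rw [show pvBCore (1 - 1) (b - 2) = pvRep ['b'] (b - 2) from
          pvBCore_bs (by omega) (by omega)]
      rw [pvBCore, if_neg (by omega : ¬ b ≤ 0), if_neg (by omega : ¬ (1:Int) ≤ 0),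
        if_neg (by omega : (1:Int) ≠ b), if_neg (by omega : ¬ (1:Int) > b),
        if_neg (by omega : ¬ b - 1 ≤ 1)]
      rw [pvRep_succ (by omega : (0:Int) < 1), pvRep_nonpos (by omega : (1:Int) - 1 ≤ 0),
        show (b - 2 * 1 : Int) = b - 2 by ring]
      simp
  · -- a ≥ 2
    rw [pvBCore,
      if_neg (by omega : ¬ b ≤ 0), if_neg (by omega : ¬ a ≤ 0),
      if_neg (by omega : ¬ a = b), if_neg (by omega : ¬ a > b)]
    by_cases he : a - 1 = b - 2
    · rw [if_pos (by omega : b - a ≤ a),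
        show pvBCore (a - 1) (b - 2) = pvRep ['a','b'] (a - 1) from
          pvBCore_eq (by omega) he]
      rw [pvRep_succ (by omega : (0:Int) < b - a), pvRep_nonpos (by omega : b - a - 1 ≤ 0),
        show (2*a - b : Int) = a - 1 by omega]
      simp
    · rw [pvBCore,
        if_neg (by omega : ¬ b - 2 ≤ 0), if_neg (by omega : ¬ a - 1 ≤ 0),
        if_neg he, if_neg (by omega : ¬ a - 1 > b - 2)]
      by_cases hc : b - a ≤ a
      · rw [if_pos hc, if_pos (by omega : b - 2 - (a - 1) ≤ a - 1)]
        rw [pvRep_succ (by omega : (0:Int) < b - a),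
          show (b - a - 1 : Int) = b - 2 - (a - 1) by omega,
          show (2*a - b : Int) = 2 * (a - 1) - (b - 2) by omega]
        simp
      · rw [if_neg hc, if_neg (by omega : ¬ b - 2 - (a - 1) ≤ a - 1)]
        rw [pvRep_succ (by omega : (0:Int) < a),
          show (b - 2*a : Int) = b - 2 - 2 * (a - 1) by omega]
        simp

theorem pvMain (a b : Int) : pvALoop a b = pvBCore a b := by
  rw [pvALoop]
  by_cases h : a > 0 ∨ b > 0
  · rw [dif_pos h]
    by_cases hab : a > b
    · rw [if_pos hab]
      have ha : 0 < a := by omega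
      by_cases hb : b > 0
      · have ha1 : a > 1 := by omega
        rw [if_pos ha1, if_pos hb, if_pos ha1, if_pos hb]
        rw [pvMain (a - 2) (b - 1), pvBCore_aab hb hab]
        simp
      · -- b ≤ 0 < a : B is "a" repeated a times
        rw [if_neg hb, if_neg hb]
        by_cases ha1 : a > 1
        · rw [if_pos ha1, if_pos ha1, pvMain (a - 2) b]
          rw [show pvBCore a b = pvRep ['a'] a from pvBCore_as (by omega),
            show pvBCore (a - 2) b = pvRep ['a'] (a - 2) from pvBCore_as (by omega)]
          rw [pvRep_succ ha, pvRep_succ (by omega : (0:Int) < a - 1),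
            show (a - 1 - 1 : Int) = a - 2 by omega]
          simp
        · rw [if_neg ha1, if_neg ha1, pvMain (a - 1) b]
          rw [show pvBCore a b = pvRep ['a'] a from pvBCore_as (by omega),
            show pvBCore (a - 1) b = pvRep ['a'] (a - 1) from pvBCore_as (by omega)]
          rw [pvRep_succ ha, pvRep_nonpos (by omega : a - 1 ≤ 0)]
          simp
    · rw [if_neg hab]
      by_cases hba : b > a
      · rw [if_pos hba]
        have hb : 0 < b := by omega
        by_cases hha : a > 0
        · have hb1 : b > 1 := by omega
          rw [if_pos hb1, if_pos hha, if_pos hha, if_pos hb1]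
          rw [pvMain (a - 1) (b - 2), pvBCore_bba hha hba]
          simp
        · -- a ≤ 0 < b : B is "b" repeated b times
          rw [if_neg hha, if_neg hha]
          by_cases hb1 : b > 1
          · rw [if_pos hb1, if_pos hb1, pvMain a (b - 2)]
            rw [show pvBCore a b = pvRep ['b'] b from pvBCore_bs hb (by omega)]
            by_cases hb2 : b - 2 ≤ 0
            · rw [show pvBCore a (b - 2) = pvRep ['a'] a from pvBCore_as hb2]
              rw [pvRep_succ hb, pvRep_succ (by omega : (0:Int) < b - 1),
                pvRep_nonpos (by omega : b - 1 - 1 ≤ 0), pvRep_nonpos (by omega : a ≤ 0)]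
              simp
            · rw [show pvBCore a (b - 2) = pvRep ['b'] (b - 2) from
                  pvBCore_bs (by omega) (by omega)]
              rw [pvRep_succ hb, pvRep_succ (by omega : (0:Int) < b - 1),
                show (b - 1 - 1 : Int) = b - 2 by omega]
              simp
          · rw [if_neg hb1, if_neg hb1, pvMain a (b - 1)]
            rw [show pvBCore a b = pvRep ['b'] b from pvBCore_bs hb (by omega),
              show pvBCore a (b - 1) = pvRep ['a'] a from pvBCore_as (by omega)]
            rw [pvRep_succ hb, pvRep_nonpos (by omega : b - 1 ≤ 0),
              pvRep_nonpos (by omega : a ≤ 0)]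
            simp
      · -- a = b, both > 0
        rw [if_neg hba]
        have heq : a = b := by omega
        have ha : 0 < a := by omega
        have hb : 0 < b := by omega
        rw [if_pos ha, if_pos hb, if_pos ha, if_pos hb]
        rw [pvMain (a - 1) (b - 1)]
        rw [show pvBCore a b = pvRep ['a','b'] a from pvBCore_eq hb heq]
        by_cases hb1 : b - 1 ≤ 0
        · rw [show pvBCore (a - 1) (b - 1) = pvRep ['a'] (a - 1) from pvBCore_as hb1]
          rw [pvRep_succ ha, pvRep_nonpos (by omega : a - 1 ≤ 0),
            pvRep_nonpos (by omega : a - 1 ≤ 0)]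
          simp
        · rw [show pvBCore (a - 1) (b - 1) = pvRep ['a','b'] (a - 1) from
              pvBCore_eq (by omega) (by omega)]
          rw [pvRep_succ ha]
          simp
  · rw [dif_neg h, show pvBCore a b = pvRep ['a'] a from pvBCore_as (by omega),
      pvRep_nonpos (by omega : a ≤ 0)]
termination_by a.toNat + b.toNat
decreasing_by all_goals omega

-- ===== VERDICT (by name: the statement is the Claim_ definition above) =====
theorem strWithout3a3b_spec : Claim_equal_strWithout3a3b := by
  intro a b _
  unfold Spec_strWithout3a3b strWithout3a3b strWithout3a3b_alt
  rw [pvMain]
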